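-- pv_equiv track=rewrite | github.com/Yahbi/onsite | backend/core/scoring.py | _score_recency
-- ===== SOURCE A (Python) =====
-- from typing import Dict, List, Optional, Tuple
--
-- def _score_recency(days_old: int) -> Tuple[int, str]:
--     """Score recency (0-35 points). Most reliable signal."""
--     tiers = (
--         (1, 35), (3, 32), (5, 28), (7, 24), (10, 19),
--         (14, 14), (21, 10), (30, 6), (45, 3), (60, 2), (90, 1),
--     )
--     for threshold, pts in tiers:
--         if days_old <= threshold:
--             detail = f"{days_old} day{'s' if days_old != 1 else ''} old"
--             return pts, detail
--     return 0, f"{days_old} days old"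
-- ===== SOURCE B (Python) =====
-- import bisect
-- from typing import Tuple
--
-- _THRESHOLDS = [1, 3, 5, 7, 10, 14, 21, 30, 45, 60, 90]
-- _POINTS = [35, 32, 28, 24, 19, 14, 10, 6, 3, 2, 1]
--
-- def _score_recency(days_old: int) -> Tuple[int, str]:
--     """Score recency (0-35 points). Most reliable signal."""
--     i = bisect.bisect_left(_THRESHOLDS, days_old)
--     if i < len(_THRESHOLDS):
--         return _POINTS[i], f"{days_old} day{'s' if days_old != 1 else ''} old"
--     return 0, f"{days_old} days old"
-- ===== Notes on version B (the rewrite author's own statement) =====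
-- stated objective: idiomatic
-- what changed: Replaced the linear scan over (threshold, points) tuples with bisect.bisect_left on a sorted thresholds list indexing a parallel points list.
import Mathlib
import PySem

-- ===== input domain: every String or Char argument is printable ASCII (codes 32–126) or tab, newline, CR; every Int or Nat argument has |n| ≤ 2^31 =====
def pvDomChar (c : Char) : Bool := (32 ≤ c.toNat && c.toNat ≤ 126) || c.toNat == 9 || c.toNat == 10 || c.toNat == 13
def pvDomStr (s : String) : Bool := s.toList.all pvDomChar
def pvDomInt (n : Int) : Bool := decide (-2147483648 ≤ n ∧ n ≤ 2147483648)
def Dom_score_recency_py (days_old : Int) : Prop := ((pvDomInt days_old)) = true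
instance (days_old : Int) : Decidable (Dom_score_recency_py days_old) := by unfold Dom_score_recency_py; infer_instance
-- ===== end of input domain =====

-- B replaces A's linear scan over tier tuples with bisect_left on a sorted thresholds list plus a parallel points list (idiomatic, not faster).


-- ===== PORT A =====
-- Loop over the tier tuples, returning at the first threshold ≥ days_old.
def scoreRecencyLoop (days_old : Int) : List (Int × Int) → Int × String
  | [] => (0, PySem.Int.toStr days_old ++ " days old")
  | (threshold, pts) :: rest =>
      if days_old ≤ threshold then
        (pts, PySem.Int.toStr days_old ++ " day" ++ (if days_old ≠ 1 then "s" else "") ++ " old")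
      else scoreRecencyLoop days_old rest

def score_recency_py (days_old : Int) : Int × String :=
  scoreRecencyLoop days_old
    [(1, 35), (3, 32), (5, 28), (7, 24), (10, 19),
     (14, 14), (21, 10), (30, 6), (45, 3), (60, 2), (90, 1)]

-- ===== PORT B =====
-- bisect.bisect_left on a sorted list = number of leading elements < x (exact for sorted input).
def bisectLeft (xs : List Int) (x : Int) : Nat := (xs.takeWhile (· < x)).length

def bThresholds : List Int := [1, 3, 5, 7, 10, 14, 21, 30, 45, 60, 90]
def bPoints : List Int := [35, 32, 28, 24, 19, 14, 10, 6, 3, 2, 1]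

def score_recency_py_alt (days_old : Int) : Int × String :=
  let i := bisectLeft bThresholds days_old
  if i < bThresholds.length then
    (bPoints.getD i 0,
     PySem.Int.toStr days_old ++ " day" ++ (if days_old ≠ 1 then "s" else "") ++ " old")
  else (0, PySem.Int.toStr days_old ++ " days old")

-- ===== PRECONDITION & SPEC =====
def Spec_score_recency_py (days_old : Int) (out : Int × String) : Prop := out = score_recency_py_alt days_old
instance (days_old : Int) (out : Int × String) : Decidable (Spec_score_recency_py days_old out) := by unfold Spec_score_recency_py; infer_instance

-- ===== CLAIM (what is proved, stated in full; the proofs are below) =====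
def Claim_equal_score_recency_py : Prop := ∀ (days_old : Int), Dom_score_recency_py days_old → Spec_score_recency_py days_old (score_recency_py days_old)

-- ===== LEMMAS AND PROOFS =====


-- ===== VERDICT (by name: the statement is the Claim_ definition above) =====
theorem score_recency_py_spec : Claim_equal_score_recency_py := by
  intro d _
  unfold Spec_score_recency_py score_recency_py score_recency_py_alt bisectLeft bThresholds bPoints
  by_cases h1 : d ≤ 1
  · have nt : ¬(1:Int) < d := by omega
    simp [scoreRecencyLoop, List.takeWhile, *]
  by_cases h2 : d ≤ 3
  · have hne : d ≠ 1 := by omega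
    have l1 : (1:Int) < d := by omega
    have nt : ¬(3:Int) < d := by omega
    simp [scoreRecencyLoop, List.takeWhile, *]
  by_cases h3 : d ≤ 5
  · have hne : d ≠ 1 := by omega
    have l1 : (1:Int) < d := by omega
    have l3 : (3:Int) < d := by omega
    have nt : ¬(5:Int) < d := by omega
    simp [scoreRecencyLoop, List.takeWhile, *]
  by_cases h4 : d ≤ 7
  · have hne : d ≠ 1 := by omega
    have l1 : (1:Int) < d := by omega
    have l3 : (3:Int) < d := by omega
    have l5 : (5:Int) < d := by omega
    have nt : ¬(7:Int) < d := by omega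
    simp [scoreRecencyLoop, List.takeWhile, *]
  by_cases h5 : d ≤ 10
  · have hne : d ≠ 1 := by omega
    have l1 : (1:Int) < d := by omega
    have l3 : (3:Int) < d := by omega
    have l5 : (5:Int) < d := by omega
    have l7 : (7:Int) < d := by omega
    have nt : ¬(10:Int) < d := by omega
    simp [scoreRecencyLoop, List.takeWhile, *]
  by_cases h6 : d ≤ 14
  · have hne : d ≠ 1 := by omega
    have l1 : (1:Int) < d := by omega
    have l3 : (3:Int) < d := by omega
    have l5 : (5:Int) < d := by omega
    have l7 : (7:Int) < d := by omega
    have l10 : (10:Int) < d := by omega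
    have nt : ¬(14:Int) < d := by omega
    simp [scoreRecencyLoop, List.takeWhile, *]
  by_cases h7 : d ≤ 21
  · have hne : d ≠ 1 := by omega
    have l1 : (1:Int) < d := by omega
    have l3 : (3:Int) < d := by omega
    have l5 : (5:Int) < d := by omega
    have l7 : (7:Int) < d := by omega
    have l10 : (10:Int) < d := by omega
    have l14 : (14:Int) < d := by omega
    have nt : ¬(21:Int) < d := by omega
    simp [scoreRecencyLoop, List.takeWhile, *]
  by_cases h8 : d ≤ 30
  · have hne : d ≠ 1 := by omega
    have l1 : (1:Int) < d := by omega
    have l3 : (3:Int) < d := by omega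
    have l5 : (5:Int) < d := by omega
    have l7 : (7:Int) < d := by omega
    have l10 : (10:Int) < d := by omega
    have l14 : (14:Int) < d := by omega
    have l21 : (21:Int) < d := by omega
    have nt : ¬(30:Int) < d := by omega
    simp [scoreRecencyLoop, List.takeWhile, *]
  by_cases h9 : d ≤ 45
  · have hne : d ≠ 1 := by omega
    have l1 : (1:Int) < d := by omega
    have l3 : (3:Int) < d := by omega
    have l5 : (5:Int) < d := by omega
    have l7 : (7:Int) < d := by omega
    have l10 : (10:Int) < d := by omega
    have l14 : (14:Int) < d := by omega
    have l21 : (21:Int) < d := by omega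
    have l30 : (30:Int) < d := by omega
    have nt : ¬(45:Int) < d := by omega
    simp [scoreRecencyLoop, List.takeWhile, *]
  by_cases h10 : d ≤ 60
  · have hne : d ≠ 1 := by omega
    have l1 : (1:Int) < d := by omega
    have l3 : (3:Int) < d := by omega
    have l5 : (5:Int) < d := by omega
    have l7 : (7:Int) < d := by omega
    have l10 : (10:Int) < d := by omega
    have l14 : (14:Int) < d := by omega
    have l21 : (21:Int) < d := by omega
    have l30 : (30:Int) < d := by omega
    have l45 : (45:Int) < d := by omega
    have nt : ¬(60:Int) < d := by omega
    simp [scoreRecencyLoop, List.takeWhile, *]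
  by_cases h11 : d ≤ 90
  · have hne : d ≠ 1 := by omega
    have l1 : (1:Int) < d := by omega
    have l3 : (3:Int) < d := by omega
    have l5 : (5:Int) < d := by omega
    have l7 : (7:Int) < d := by omega
    have l10 : (10:Int) < d := by omega
    have l14 : (14:Int) < d := by omega
    have l21 : (21:Int) < d := by omega
    have l30 : (30:Int) < d := by omega
    have l45 : (45:Int) < d := by omega
    have l60 : (60:Int) < d := by omega
    have nt : ¬(90:Int) < d := by omega
    simp [scoreRecencyLoop, List.takeWhile, *]
  · have l1 : (1:Int) < d := by omega
    have l3 : (3:Int) < d := by omega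
    have l5 : (5:Int) < d := by omega
    have l7 : (7:Int) < d := by omega
    have l10 : (10:Int) < d := by omega
    have l14 : (14:Int) < d := by omega
    have l21 : (21:Int) < d := by omega
    have l30 : (30:Int) < d := by omega
    have l45 : (45:Int) < d := by omega
    have l60 : (60:Int) < d := by omega
    have l90 : (90:Int) < d := by omega
    simp [scoreRecencyLoop, List.takeWhile, *]
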